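-- pv_equiv track=rewrite | github.com/vedangwartikar/9-Mens-Morris-using-AI | main.py | generate_remove
-- ===== SOURCE A (Python) =====
-- def closeMill(location, board) -> bool:
--     check_mill = board[location]
--     if board[location] in ('W', 'B'):
--         if location == 0:
--             return True if board[6] == check_mill and board[18] == check_mill else False
--         elif location == 1:
--             return True if board[11] == check_mill and board[20] == check_mill else False
--         elif location == 2:
--             return True if board[7] == check_mill and board[15] == check_mill else False
--         elif location == 3:
--             return True if board[10] == check_mill and board[17] == check_mill else False
--         elif location == 4:
--             return True if board[8] == check_mill and board[12] == check_mill else False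
--         elif location == 5:
--             return True if board[9] == check_mill and board[14] == check_mill else False
--         elif location == 6:
--             return True if ((board[0] == check_mill and board[18] == check_mill) or (board[7] == check_mill and board[8] == check_mill)) else False
--         elif location == 7:
--             return True if ((board[2] == check_mill and board[15] == check_mill) or (board[6] == check_mill and board[8] == check_mill)) else False
--         elif location == 8:
--             return True if ((board[4] == check_mill and board[12] == check_mill) or (board[6] == check_mill and board[7] == check_mill)) else False
--         elif location == 9:
--             return True if ((board[5] == check_mill and board[14] == check_mill) or (board[10] == check_mill and board[11] == check_mill)) else False
--         elif location == 10:
--             return True if ((board[3] == check_mill and board[17] == check_mill) or (board[9] == check_mill and board[11] == check_mill)) else False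
--         elif location == 11:
--             return True if ((board[1] == check_mill and board[20] == check_mill) or (board[9] == check_mill and board[10] == check_mill)) else False
--         elif location == 12:
--             return True if ((board[4] == check_mill and board[8] == check_mill) or (board[13] == check_mill and board[14] == check_mill)) else False
--         elif location == 13:
--             return True if ((board[12] == check_mill and board[14] == check_mill) or (board[16] == check_mill and board[19] == check_mill)) else False
--         elif location == 14:
--             return True if ((board[5] == check_mill and board[9] == check_mill) or (board[12] == check_mill and board[13] == check_mill)) else False
--         elif location == 15:
--             return True if ((board[2] == check_mill and board[7] == check_mill) or (board[16] == check_mill and board[17] == check_mill)) else False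
--         elif location == 16:
--             return True if ((board[13] == check_mill and board[19] == check_mill) or (board[15] == check_mill and board[17] == check_mill)) else False
--         elif location == 17:
--             return True if ((board[3] == check_mill and board[10] == check_mill) or (board[15] == check_mill and board[16] == check_mill)) else False
--         elif location == 18:
--             return True if ((board[0] == check_mill and board[6] == check_mill) or (board[19] == check_mill and board[20] == check_mill)) else False
--         elif location == 19:
--             return True if ((board[16] == check_mill and board[13] == check_mill) or (board[18] == check_mill and board[20] == check_mill)) else False
--         elif location == 20:
--             return True if ((board[1] == check_mill and board[11] == check_mill) or (board[18] == check_mill and board[19] == check_mill)) else False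
--         else:
--             return False
--     return False
--
-- def generate_remove(board, move_list) -> list:
--     no_positions_added = True
--     for location, piece in enumerate(board):
--         if piece == 'B':
--             if not closeMill(location, board):
--                 temp_board = list(board)
--                 temp_board[location] = 'x'
--                 temp_board = ''.join(temp_board)
--                 move_list.append(temp_board)
--                 no_positions_added = False
--     if no_positions_added:
--         move_list.append(board)
--     return move_list
-- ===== SOURCE B (Python) =====
-- # The 12 mills of the board as global triples; a piece is safe iff it lies in an all-'B' triple.
-- MILL_TRIPLES = [(0, 6, 18), (1, 11, 20), (2, 7, 15), (3, 10, 17), (4, 8, 12), (5, 9, 14),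
--                 (6, 7, 8), (9, 10, 11), (12, 13, 14), (13, 16, 19), (15, 16, 17), (18, 19, 20)]
--
-- def generate_remove(board, move_list) -> list:
--     black = {i for i, p in enumerate(board) if p == 'B'}
--     milled = set()
--     for t in MILL_TRIPLES:
--         if black.issuperset(t):
--             milled.update(t)
--     removable = sorted(black - milled)
--     if removable:
--         for i in removable:
--             move_list.append(board[:i] + 'x' + board[i + 1:])
--     else:
--         move_list.append(board)
--     return move_list
-- ===== Notes on version B (the rewrite author's own statement) =====
-- stated objective: alternative
-- what changed: Instead of testing each piece with closeMill's 21-branch per-location scan, B builds the set of black positions once, marks every position covered by an all-black mill using the global list of 12 mill triples, and emits one removal board per black position left after the set difference.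
-- outside the precondition, e.g. on generate_remove('BxxxxxxC', []): A returns ['xxxxxxxC'], B returns ['xxxxxxxC']
import Mathlib
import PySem

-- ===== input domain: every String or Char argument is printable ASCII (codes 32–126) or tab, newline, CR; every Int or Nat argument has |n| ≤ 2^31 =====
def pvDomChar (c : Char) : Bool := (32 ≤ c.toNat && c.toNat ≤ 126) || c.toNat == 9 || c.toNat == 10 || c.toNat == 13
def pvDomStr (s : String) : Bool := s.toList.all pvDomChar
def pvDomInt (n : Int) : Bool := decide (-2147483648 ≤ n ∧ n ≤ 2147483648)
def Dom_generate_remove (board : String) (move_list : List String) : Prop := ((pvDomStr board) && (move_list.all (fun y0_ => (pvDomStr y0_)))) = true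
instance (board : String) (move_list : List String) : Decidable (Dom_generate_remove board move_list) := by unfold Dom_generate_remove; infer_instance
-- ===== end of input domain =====

-- B drops the per-location closeMill scan entirely: it builds the set of black positions, marks the
-- positions covered by an all-black mill using the global list of 12 mill triples, and emits one board
-- per remaining black position (simpler/alternative); Python A and B both mutate move_list identically
-- (append), and the equivalence proved here is about the return value.

-- ===== PORT A =====
-- board[i] == check_mill for a fixed nonnegative literal index i: Python raises when i is out of
-- range; under Pre_ every index Python actually evaluates is in range, so l[i]? = some c is exact there.
def chkA (l : List Char) (i : Nat) (c : Char) : Bool := l[i]? == some c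

def closeMillA (loc : Nat) (l : List Char) : Bool :=
  -- check_mill = board[location]; loc is always in range at the call site (it comes from enumerate)
  let c := l.getD loc ' '
  if c = 'W' ∨ c = 'B' then
    if loc = 0 then chkA l 6 c && chkA l 18 c
    else if loc = 1 then chkA l 11 c && chkA l 20 c
    else if loc = 2 then chkA l 7 c && chkA l 15 c
    else if loc = 3 then chkA l 10 c && chkA l 17 c
    else if loc = 4 then chkA l 8 c && chkA l 12 c
    else if loc = 5 then chkA l 9 c && chkA l 14 c
    else if loc = 6 then (chkA l 0 c && chkA l 18 c) || (chkA l 7 c && chkA l 8 c)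
    else if loc = 7 then (chkA l 2 c && chkA l 15 c) || (chkA l 6 c && chkA l 8 c)
    else if loc = 8 then (chkA l 4 c && chkA l 12 c) || (chkA l 6 c && chkA l 7 c)
    else if loc = 9 then (chkA l 5 c && chkA l 14 c) || (chkA l 10 c && chkA l 11 c)
    else if loc = 10 then (chkA l 3 c && chkA l 17 c) || (chkA l 9 c && chkA l 11 c)
    else if loc = 11 then (chkA l 1 c && chkA l 20 c) || (chkA l 9 c && chkA l 10 c)
    else if loc = 12 then (chkA l 4 c && chkA l 8 c) || (chkA l 13 c && chkA l 14 c)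
    else if loc = 13 then (chkA l 12 c && chkA l 14 c) || (chkA l 16 c && chkA l 19 c)
    else if loc = 14 then (chkA l 5 c && chkA l 9 c) || (chkA l 12 c && chkA l 13 c)
    else if loc = 15 then (chkA l 2 c && chkA l 7 c) || (chkA l 16 c && chkA l 17 c)
    else if loc = 16 then (chkA l 13 c && chkA l 19 c) || (chkA l 15 c && chkA l 17 c)
    else if loc = 17 then (chkA l 3 c && chkA l 10 c) || (chkA l 15 c && chkA l 16 c)
    else if loc = 18 then (chkA l 0 c && chkA l 6 c) || (chkA l 19 c && chkA l 20 c)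
    else if loc = 19 then (chkA l 16 c && chkA l 13 c) || (chkA l 18 c && chkA l 20 c)
    else if loc = 20 then (chkA l 1 c && chkA l 11 c) || (chkA l 18 c && chkA l 19 c)
    else false
  else false

-- the body of A's loop over enumerate(board): state = (move_list, no_positions_added)
def stepA (l : List Char) (st : List String × Bool) (pi : Char × Nat) : List String × Bool :=
  if pi.1 = 'B' then
    if ¬ closeMillA pi.2 l then
      -- temp_board = list(board); temp_board[location] = 'x'; ''.join(temp_board); append
      (st.1 ++ [String.ofList (l.set pi.2 'x')], false)
    else st
  else st

def generate_remove (board : String) (move_list : List String) : List String :=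
  let l := board.toList
  let st := l.zipIdx.foldl (stepA l) (move_list, true)
  if st.2 then st.1 ++ [board] else st.1

-- ===== PORT B =====
-- the 12 mills of the board as global triples (Source B's MILL_TRIPLES)
def MILL_TRIPLES : List (Nat × Nat × Nat) :=
  [(0, 6, 18), (1, 11, 20), (2, 7, 15), (3, 10, 17), (4, 8, 12), (5, 9, 14),
   (6, 7, 8), (9, 10, 11), (12, 13, 14), (13, 16, 19), (15, 16, 17), (18, 19, 20)]

def generate_remove_alt (board : String) (move_list : List String) : List String :=
  let l := board.toList
  -- black = {i for i, p in enumerate(board) if p == 'B'}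
  let black : PySem.Set Nat :=
    PySem.Set.ofList (l.zipIdx.filterMap (fun p => if p.1 = 'B' then some p.2 else none))
  -- for t in MILL_TRIPLES: if black.issuperset(t): milled.update(t)
  let milled : PySem.Set Nat :=
    MILL_TRIPLES.foldl (fun m t =>
      if PySem.Set.issuperset black [t.1, t.2.1, t.2.2] then
        PySem.Set.update m [t.1, t.2.1, t.2.2]
      else m) PySem.Set.empty
  -- removable = sorted(black - milled)
  let removable := PySem.List.sorted (PySem.Set.diff black milled) (fun i => i)
  -- board[:i] + 'x' + board[i+1:] for each removable i, else the original board
  if removable = [] then move_list ++ [board]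
  else move_list ++ removable.map (fun i => String.ofList (l.take i ++ 'x' :: l.drop (i + 1)))

-- ===== PRECONDITION & SPEC =====
-- Pre_ excludes boards shorter than 21 that contain 'B': there closeMill's fixed-index lookups
-- hit positions past the end and usually raise IndexError (only a few such boards return, when
-- every out-of-range lookup is skipped by short-circuit evaluation).
def Pre_generate_remove (board : String) (move_list : List String) : Prop :=
  21 ≤ board.toList.length ∨ 'B' ∉ board.toList
instance (board : String) (move_list : List String) : Decidable (Pre_generate_remove board move_list) := by unfold Pre_generate_remove; infer_instance
def pvWitness_generate_remove : String × List String := ("WBxxxxxxxxxxxxxxxxxxx", [])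

def Spec_generate_remove (board : String) (move_list : List String) (out : List String) : Prop := out = generate_remove_alt board move_list
instance (board : String) (move_list : List String) (out : List String) : Decidable (Spec_generate_remove board move_list out) := by unfold Spec_generate_remove; infer_instance

-- ===== CLAIM (what is proved, stated in full; the proofs are below) =====
def Claim_equal_generate_remove : Prop := ∀ (board : String) (move_list : List String), Dom_generate_remove board move_list → Pre_generate_remove board move_list → Spec_generate_remove board move_list (generate_remove board move_list)

-- ===== LEMMAS AND PROOFS =====

-- proof-side names for the terms of B's port
def blackL (l : List Char) : List Nat :=
  l.zipIdx.filterMap (fun p => if p.1 = 'B' then some p.2 else none)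

def millStep (b : PySem.Set Nat) (m : PySem.Set Nat) (t : Nat × Nat × Nat) : PySem.Set Nat :=
  if PySem.Set.issuperset b [t.1, t.2.1, t.2.2] then PySem.Set.update m [t.1, t.2.1, t.2.2] else m

def inTriple (i : Nat) (t : Nat × Nat × Nat) : Prop := i = t.1 ∨ i = t.2.1 ∨ i = t.2.2

def allB (l : List Char) (t : Nat × Nat × Nat) : Prop :=
  l[t.1]? = some 'B' ∧ l[t.2.1]? = some 'B' ∧ l[t.2.2]? = some 'B'

-- A's removal list as a filterMap over enumerate(board)
def remB (l : List Char) (ps : List (Char × Nat)) : List String :=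
  ps.filterMap (fun pi =>
    if pi.1 = 'B' ∧ ¬ closeMillA pi.2 l then
      some (String.ofList (l.take pi.2 ++ 'x' :: l.drop (pi.2 + 1)))
    else none)

lemma mem_blackL (l : List Char) (i : Nat) : i ∈ blackL l ↔ l[i]? = some 'B' := by
  unfold blackL
  simp only [List.mem_filterMap]
  constructor
  · rintro ⟨p, hp, hf⟩
    by_cases hB : p.1 = 'B'
    · simp only [if_pos hB] at hf
      obtain rfl := Option.some.inj hf
      rw [← hB]; exact List.mem_zipIdx_iff_getElem?.mp hp
    · simp [if_neg hB] at hf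
  · intro hi
    exact ⟨('B', i), List.mem_zipIdx_iff_getElem?.mpr hi, by simp⟩

lemma filterMap_if_eq_map_filter {α β : Type} (P : α → Prop) [DecidablePred P] (g : α → β)
    (xs : List α) :
    xs.filterMap (fun x => if P x then some (g x) else none) =
      (xs.filter (fun x => decide (P x))).map g := by
  induction xs with
  | nil => rfl
  | cons x xs ih =>
    by_cases h : P x <;> simp [List.filter_cons, h, ih]

lemma pairwise_blackL (l : List Char) : (blackL l).Pairwise (· < ·) := by
  unfold blackL
  rw [filterMap_if_eq_map_filter (fun p => p.1 = 'B') (fun p => p.2) l.zipIdx,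
    List.pairwise_map]
  apply List.Pairwise.filter
  have h := List.pairwise_lt_range' (s := 0) (n := l.length) 1
  rw [← List.zipIdx_map_snd 0 l, List.pairwise_map] at h
  exact h

lemma mem_millFold (b : PySem.Set Nat) (ts : List (Nat × Nat × Nat)) (m0 : PySem.Set Nat) (i : Nat) :
    i ∈ ts.foldl (millStep b) m0 ↔
      i ∈ m0 ∨ ∃ t ∈ ts, PySem.Set.issuperset b [t.1, t.2.1, t.2.2] = true ∧ inTriple i t := by
  induction ts generalizing m0 with
  | nil => simp
  | cons t ts ih =>
    rw [List.foldl_cons, ih]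
    have hmem : i ∈ millStep b m0 t ↔
        i ∈ m0 ∨ (PySem.Set.issuperset b [t.1, t.2.1, t.2.2] = true ∧ inTriple i t) := by
      unfold millStep
      by_cases h : PySem.Set.issuperset b [t.1, t.2.1, t.2.2] = true
      · rw [if_pos h]
        simp only [PySem.Set.mem_update, List.mem_cons, List.not_mem_nil, or_false, inTriple,
          h, true_and]
      · simp [h]
    rw [hmem]
    simp only [List.mem_cons]
    constructor
    · rintro ((hm | ⟨hc, hin⟩) | ⟨u, hu, hc, hin⟩)
      · exact Or.inl hm
      · exact Or.inr ⟨t, Or.inl rfl, hc, hin⟩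
      · exact Or.inr ⟨u, Or.inr hu, hc, hin⟩
    · rintro (hm | ⟨u, (rfl | hu), hc, hin⟩)
      · exact Or.inl (Or.inl hm)
      · exact Or.inl (Or.inr ⟨hc, hin⟩)
      · exact Or.inr ⟨u, hu, hc, hin⟩

lemma issuperset_blackL (l : List Char) (t : Nat × Nat × Nat) :
    PySem.Set.issuperset (blackL l) [t.1, t.2.1, t.2.2] = true ↔ allB l t := by
  simp only [PySem.Set.issuperset, PySem.Set.issubset, PySem.Set.contains]
  rw [List.all_eq_true]
  constructor
  · intro h
    exact ⟨(mem_blackL l t.1).mp (List.contains_iff_mem.mp (h _ (by simp))),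
           (mem_blackL l t.2.1).mp (List.contains_iff_mem.mp (h _ (by simp))),
           (mem_blackL l t.2.2).mp (List.contains_iff_mem.mp (h _ (by simp)))⟩
  · rintro ⟨h1, h2, h3⟩ x hx
    simp only [List.mem_cons, List.not_mem_nil, or_false] at hx
    rcases hx with rfl | rfl | rfl <;>
      exact List.contains_iff_mem.mpr ((mem_blackL l _).mpr (by assumption))

set_option maxHeartbeats 1000000 in
lemma closeMillA_iff (l : List Char) (i : Nat) (hi : l[i]? = some 'B') :
    closeMillA i l = true ↔ ∃ t ∈ MILL_TRIPLES, allB l t ∧ inTriple i t := by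
  have hc : l.getD i ' ' = 'B' := by simp [List.getD_eq_getElem?_getD, hi]
  rcases i with _|_|_|_|_|_|_|_|_|_|_|_|_|_|_|_|_|_|_|_|_|i <;>
    rw [closeMillA] <;>
    simp only [hc] <;>
    simp [chkA, MILL_TRIPLES, allB, inTriple, hi] <;>
    tauto

-- ===== A-SIDE LOOP LEMMAS =====
lemma stepA_skip (l : List Char) (st : List String × Bool) (p : Char × Nat)
    (h : ¬ (p.1 = 'B' ∧ ¬ closeMillA p.2 l = true)) : stepA l st p = st := by
  unfold stepA
  by_cases hB : p.1 = 'B'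
  · have hm : closeMillA p.2 l = true := by
      by_contra hm; exact h ⟨hB, hm⟩
    simp [hB, hm]
  · simp [hB]

lemma stepA_take (l : List Char) (st : List String × Bool) (p : Char × Nat)
    (h : p.1 = 'B' ∧ ¬ closeMillA p.2 l = true) :
    stepA l st p = (st.1 ++ [String.ofList (l.set p.2 'x')], false) := by
  unfold stepA
  simp [h.1, h.2]

lemma remB_cons_skip (l : List Char) (p : Char × Nat) (ps : List (Char × Nat))
    (h : ¬ (p.1 = 'B' ∧ ¬ closeMillA p.2 l = true)) : remB l (p :: ps) = remB l ps := by
  simp only [remB, List.filterMap_cons, if_neg h]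

lemma remB_cons_take (l : List Char) (p : Char × Nat) (ps : List (Char × Nat))
    (h : p.1 = 'B' ∧ ¬ closeMillA p.2 l = true) :
    remB l (p :: ps) =
      String.ofList (l.take p.2 ++ 'x' :: l.drop (p.2 + 1)) :: remB l ps := by
  simp only [remB, List.filterMap_cons, if_pos h]

lemma fold_false (l : List Char) (ps : List (Char × Nat))
    (hps : ∀ pi ∈ ps, pi.2 < l.length) :
    ∀ ml : List String, ps.foldl (stepA l) (ml, false) = (ml ++ remB l ps, false) := by
  induction ps with
  | nil => intro ml; simp [remB]
  | cons p ps ih =>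
    intro ml
    have hp : p.2 < l.length := hps p (List.mem_cons_self ..)
    have ih' := ih (fun pi h => hps pi (List.mem_cons_of_mem _ h))
    rw [List.foldl_cons]
    by_cases hg : p.1 = 'B' ∧ ¬ closeMillA p.2 l = true
    · rw [stepA_take l _ p hg, remB_cons_take l p ps hg, ih',
        List.set_eq_take_cons_drop 'x' hp]
      simp
    · rw [stepA_skip l _ p hg, remB_cons_skip l p ps hg, ih']

lemma fold_inv (l : List Char) (ps : List (Char × Nat))
    (hps : ∀ pi ∈ ps, pi.2 < l.length) :
    ∀ ml : List String,
      ps.foldl (stepA l) (ml, true) = (ml ++ remB l ps, (remB l ps).isEmpty) := by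
  induction ps with
  | nil => intro ml; simp [remB]
  | cons p ps ih =>
    intro ml
    have hp : p.2 < l.length := hps p (List.mem_cons_self ..)
    have hset : l.set p.2 'x' = l.take p.2 ++ 'x' :: l.drop (p.2 + 1) :=
      List.set_eq_take_cons_drop 'x' hp
    have ih' := ih (fun pi h => hps pi (List.mem_cons_of_mem _ h))
    rw [List.foldl_cons]
    by_cases hg : p.1 = 'B' ∧ ¬ closeMillA p.2 l = true
    · rw [stepA_take l _ p hg, remB_cons_take l p ps hg,
        fold_false l ps (fun pi h => hps pi (List.mem_cons_of_mem _ h)), hset]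
      simp
    · rw [stepA_skip l _ p hg, remB_cons_skip l p ps hg, ih' ml]

-- the heart of the equivalence: A's filtered enumerate-loop output is B's sorted set difference, mapped
lemma main_eq (l : List Char) :
    remB l l.zipIdx =
      (PySem.List.sorted
          (PySem.Set.diff (PySem.Set.ofList (blackL l))
            (MILL_TRIPLES.foldl (millStep (PySem.Set.ofList (blackL l))) PySem.Set.empty))
          (fun i => i)).map
        (fun i => String.ofList (l.take i ++ 'x' :: l.drop (i + 1))) := by
  have hnd : (blackL l).Nodup := (pairwise_blackL l).imp (fun h => Nat.ne_of_lt h)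
  rw [PySem.Set.ofList_eq_self_of_nodup _ hnd]
  have hdiff : PySem.Set.diff (blackL l) (MILL_TRIPLES.foldl (millStep (blackL l)) PySem.Set.empty)
      = (blackL l).filter
          (fun i => !(PySem.Set.contains (MILL_TRIPLES.foldl (millStep (blackL l)) PySem.Set.empty) i)) := rfl
  rw [hdiff,
    PySem.List.sorted_eq_of_perm_of_pairwise_lt _ _ _ (List.Perm.refl _)
      ((pairwise_blackL l).filter _)]
  unfold remB blackL
  rw [List.filter_filterMap, List.map_filterMap]
  apply List.filterMap_congr
  intro p hp
  by_cases hB : p.1 = 'B'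
  · have hi : l[p.2]? = some 'B' := by
      have := List.mem_zipIdx_iff_getElem?.mp hp
      rwa [hB] at this
    have hcm : closeMillA p.2 l = true ↔
        p.2 ∈ MILL_TRIPLES.foldl (millStep (blackL l)) PySem.Set.empty := by
      rw [closeMillA_iff l p.2 hi, mem_millFold]
      simp only [PySem.Set.empty, List.not_mem_nil, false_or]
      constructor
      · rintro ⟨t, ht, hA, hin⟩
        exact ⟨t, ht, (issuperset_blackL l t).mpr hA, hin⟩
      · rintro ⟨t, ht, hS, hin⟩
        exact ⟨t, ht, (issuperset_blackL l t).mp hS, hin⟩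
    by_cases hmem : p.2 ∈ MILL_TRIPLES.foldl (millStep (blackL l)) PySem.Set.empty
    · have hcl : closeMillA p.2 l = true := hcm.mpr hmem
      simp [hB, hcl, PySem.Set.contains, Option.filter]
      exact hmem
    · have hcl : ¬ closeMillA p.2 l = true := fun h => hmem (hcm.mp h)
      simp [hB, hcl, PySem.Set.contains, Option.filter]
      exact hmem
  · simp [hB]

-- ===== VERDICT (by name: the statement is the Claim_ definition above) =====
theorem generate_remove_spec : Claim_equal_generate_remove := by
  intro board move_list _ _
  unfold Spec_generate_remove generate_remove generate_remove_alt
  have hps : ∀ pi ∈ board.toList.zipIdx, pi.2 < board.toList.length := by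
    intro pi h
    have := List.mem_zipIdx h
    omega
  simp only [fold_inv board.toList board.toList.zipIdx hps move_list]
  have hmain := main_eq board.toList
  have hblack : board.toList.zipIdx.filterMap
      (fun p => if p.1 = 'B' then some p.2 else none) = blackL board.toList := rfl
  rw [hblack, hmain]
  have hfold : (List.foldl
      (fun m t =>
        if PySem.Set.issuperset (PySem.Set.ofList (blackL board.toList)) [t.1, t.2.1, t.2.2] then
          PySem.Set.update m [t.1, t.2.1, t.2.2]
        else m) PySem.Set.empty MILL_TRIPLES) =
      List.foldl (millStep (PySem.Set.ofList (blackL board.toList))) PySem.Set.empty MILL_TRIPLES := rfl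
  rw [hfold]
  generalize (PySem.List.sorted
      ((PySem.Set.ofList (blackL board.toList)).diff
        (List.foldl (millStep (PySem.Set.ofList (blackL board.toList))) PySem.Set.empty MILL_TRIPLES))
      fun i => i) = r
  cases r <;> simp
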